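-- pv_equiv track=rewrite | github.com/freznel10/AbletonLive12_MIDIRemoteScripts | css_freznel_2026/user copy 4.py | _path_to_string
-- ===== SOURCE A (Python) =====
-- def _path_to_string(path):
--   if not path:
--     return ""
--   parts = [f"devices[{path[0]}]"]
--   for index in range(1, len(path), 2):
--     parts.append(f"chains[{path[index]}]")
--     if index + 1 < len(path):
--       parts.append(f"devices[{path[index + 1]}]")
--   return ".".join(parts)
-- ===== SOURCE B (Python) =====
-- def _path_to_string(path):
--   return ".".join(
--     f"{'devices' if i % 2 == 0 else 'chains'}[{v}]" for i, v in enumerate(path)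
--   )
-- ===== Notes on version B (the rewrite author's own statement) =====
-- stated objective: simpler
-- what changed: Replaced A's special-cased first element plus stride-2 index loop with inner bounds guard by one uniform parity-driven pass over enumerate(path) joined directly.
import Mathlib
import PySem

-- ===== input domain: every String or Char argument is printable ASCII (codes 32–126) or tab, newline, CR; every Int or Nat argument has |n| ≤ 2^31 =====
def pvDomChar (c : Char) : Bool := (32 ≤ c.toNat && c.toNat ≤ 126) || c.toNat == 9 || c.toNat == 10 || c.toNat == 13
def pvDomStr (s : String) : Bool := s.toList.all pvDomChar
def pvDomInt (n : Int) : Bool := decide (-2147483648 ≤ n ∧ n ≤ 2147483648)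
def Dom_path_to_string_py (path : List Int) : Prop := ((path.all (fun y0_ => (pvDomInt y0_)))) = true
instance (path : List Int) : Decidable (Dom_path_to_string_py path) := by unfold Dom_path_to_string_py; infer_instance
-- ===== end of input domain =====

-- B replaces A's special-cased head plus stride-2 pair loop by one uniform parity-driven pass; objective: simpler.

-- ===== PORT A =====
def path_to_string_py (path : List Int) : String :=
  if path = [] then ""
  else
    let parts := ["devices[" ++ PySem.Int.toStr (PySem.List.pyGetD path 0 0) ++ "]"]
    let parts := (PySem.List.pyRange 1 (path.length : Int) 2).foldl
      (fun parts index =>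
        let parts := parts ++ ["chains[" ++ PySem.Int.toStr (PySem.List.pyGetD path index 0) ++ "]"]
        if index + 1 < (path.length : Int) then
          parts ++ ["devices[" ++ PySem.Int.toStr (PySem.List.pyGetD path (index + 1) 0) ++ "]"]
        else parts) parts
    PySem.Str.join "." parts

-- ===== PORT B =====
def path_to_string_py_alt (path : List Int) : String :=
  PySem.Str.join "." ((PySem.List.enumerate path).map
    (fun p => (if p.1 % 2 == 0 then "devices" else "chains") ++ "[" ++ PySem.Int.toStr p.2 ++ "]"))

-- ===== PRECONDITION & SPEC =====
def Spec_path_to_string_py (path : List Int) (out : String) : Prop := out = path_to_string_py_alt path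
instance (path : List Int) (out : String) : Decidable (Spec_path_to_string_py path out) := by unfold Spec_path_to_string_py; infer_instance

-- ===== CLAIM (what is proved, stated in full; the proofs are below) =====
def Claim_equal_path_to_string_py : Prop := ∀ (path : List Int), Dom_path_to_string_py path → Spec_path_to_string_py path (path_to_string_py path)

-- ===== LEMMAS AND PROOFS =====

-- Canonical parts list: label alternates starting from flag b.
def pvG : Bool → List Int → List String
  | _, [] => []
  | b, x :: xs => ((if b then "devices" else "chains") ++ "[" ++ PySem.Int.toStr x ++ "]") :: pvG (!b) xs

theorem pvRange_two_nil (a b : Int) (h : b ≤ a) : PySem.List.pyRange a b 2 = [] := by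
  rw [PySem.List.pyRange_of_pos _ _ (by norm_num), if_neg (by omega)]
  simp

theorem pvRange_two_cons (a b : Int) (h : a < b) :
    PySem.List.pyRange a b 2 = a :: PySem.List.pyRange (a + 2) b 2 := by
  rw [PySem.List.pyRange_of_pos _ _ (by norm_num), PySem.List.pyRange_of_pos _ _ (by norm_num)]
  have hN : (if a < b then ((b - a + 2 - 1) / 2).toNat else 0)
      = (if a + 2 < b then ((b - (a + 2) + 2 - 1) / 2).toNat else 0) + 1 := by
    split_ifs <;> omega
  rw [hN, List.range_succ_eq_map, List.map_cons, List.map_map]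
  refine congrArg₂ _ (by ring_nf) ?_
  exact List.map_congr_left (fun k _ => by simp [Function.comp]; ring)

-- A's loop, started at any index n, appends exactly the alternating tail labels.
theorem pvLoopA (path : List Int) :
    ∀ (k n : Nat) (acc : List String), path.length - n ≤ k →
    (PySem.List.pyRange (n : Int) (path.length : Int) 2).foldl
      (fun parts index =>
        let parts := parts ++ ["chains[" ++ PySem.Int.toStr (PySem.List.pyGetD path index 0) ++ "]"]
        if index + 1 < (path.length : Int) then
          parts ++ ["devices[" ++ PySem.Int.toStr (PySem.List.pyGetD path (index + 1) 0) ++ "]"]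
        else parts) acc
    = acc ++ pvG false (path.drop n) := by
  intro k
  induction k with
  | zero =>
    intro n acc hk
    have hn : path.length ≤ n := by omega
    rw [pvRange_two_nil _ _ (by exact_mod_cast hn), List.drop_eq_nil_of_le hn]
    simp [List.foldl, pvG]
  | succ k ih =>
    intro n acc hk
    by_cases h : n < path.length
    · rw [pvRange_two_cons _ _ (by exact_mod_cast h)]
      rw [List.foldl_cons]
      have hcast : ((n : Int) + 2) = ((n + 2 : Nat) : Int) := by push_cast; ring
      have hget : PySem.List.pyGetD path (n : Int) 0 = path[n] := by
        rw [PySem.List.pyGetD_eq_getElem path 0 (by positivity) (by exact_mod_cast h)]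
        simp
      rw [hcast, ih (n + 2) _ (by omega)]
      rw [List.drop_eq_getElem_cons h]
      by_cases h1 : n + 1 < path.length
      · have hif : ((n : Int) + 1 < (path.length : Int)) := by exact_mod_cast h1
        have hget1 : PySem.List.pyGetD path ((n : Int) + 1) 0 = path[n + 1] := by
          have : ((n : Int) + 1) = ((n + 1 : Nat) : Int) := by push_cast; ring
          rw [this, PySem.List.pyGetD_eq_getElem path 0 (by positivity) (by exact_mod_cast h1)]
          simp
        rw [List.drop_eq_getElem_cons h1]
        simp only [hget, hget1, if_pos hif, pvG, Bool.not_false, Bool.not_true]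
        simp
      · have hif : ¬ ((n : Int) + 1 < (path.length : Int)) := by
          intro hc; exact h1 (by exact_mod_cast hc)
        have hdrop : path.drop (n + 1) = [] := List.drop_eq_nil_of_le (by omega)
        have hdrop2 : path.drop (n + 2) = [] := List.drop_eq_nil_of_le (by omega)
        simp only [hget, if_neg hif, hdrop, hdrop2, pvG, Bool.not_false]
        simp
    · have hn : path.length ≤ n := by omega
      rw [pvRange_two_nil _ _ (by exact_mod_cast hn), List.drop_eq_nil_of_le hn]
      simp [List.foldl, pvG]

-- B's enumerate map equals the canonical alternating list.
theorem pvMapB (xs : List Int) :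
    ∀ (s : Int), 0 ≤ s →
    (PySem.List.enumerate xs s).map
      (fun p => (if p.1 % 2 == 0 then "devices" else "chains") ++ "[" ++ PySem.Int.toStr p.2 ++ "]")
    = pvG (s % 2 == 0) xs := by
  induction xs with
  | nil => intro s _; simp [PySem.List.enumerate_nil, pvG]
  | cons x xs ih =>
    intro s hs
    rw [PySem.List.enumerate_cons, List.map_cons, ih (s + 1) (by omega)]
    have hpar : ((s + 1) % 2 == 0) = !(s % 2 == 0) := by
      by_cases h : s % 2 = 0
      · have h1 : (s + 1) % 2 = 1 := by omega
        simp [h, h1]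
      · have h0 : s % 2 = 1 := by omega
        have h1 : (s + 1) % 2 = 0 := by omega
        simp [h0, h1]
    rw [hpar]
    rfl

-- ===== VERDICT (by name: the statement is the Claim_ definition above) =====
theorem path_to_string_py_spec : Claim_equal_path_to_string_py := by
  intro path _
  unfold Spec_path_to_string_py path_to_string_py path_to_string_py_alt
  rw [pvMapB path 0 (by norm_num)]
  cases path with
  | nil => decide
  | cons p rest =>
    rw [if_neg (by simp)]
    have hl := pvLoopA (p :: rest) (p :: rest).length 1
      ["devices[" ++ PySem.Int.toStr (PySem.List.pyGetD (p :: rest) 0 0) ++ "]"] (by omega)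
    push_cast at hl
    simp only []
    rw [hl]
    have hget : PySem.List.pyGetD (p :: rest) 0 0 = p := by
      rw [PySem.List.pyGetD_eq_getElem _ 0 (by norm_num) (by simp)]
      simp
    rw [hget]
    simp only [List.drop_one, List.tail_cons]
    rfl
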